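-- pv_equiv track=rewrite | github.com/facebook/sapp | sapp/pipeline/mariana_trench_parser.py | strip_anonymous_class_numbers
-- ===== SOURCE A (Python) =====
-- def strip_anonymous_class_numbers(
--     callee_signature: str, callable_line: int, issue_line: int
-- ) -> str:
--     first_semicolon = callee_signature.find(";")
--     if first_semicolon < 0:
--         return callee_signature
--     class_name = callee_signature[:first_semicolon]
--     class_name_length = len(class_name)
--     stripped_classname = ""
--     index = 0
--     while index < class_name_length:
--         character = class_name[index]
--         stripped_classname += character
--         index += 1
--         if (
--             character != "$"
--             or index == class_name_length
--             or not class_name[index].isdigit()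
--         ):
--             continue
--         while index < class_name_length and class_name[index].isdigit():
--             index += 1
--     if stripped_classname == class_name:
--         return callee_signature
--
--     relative_line = -1
--     if issue_line > -1 and issue_line >= callable_line:
--         relative_line = issue_line - callable_line
--     return (
--         f"{stripped_classname}#{relative_line}{callee_signature[first_semicolon:]}"
--     )
-- ===== SOURCE B (Python) =====
-- def strip_anonymous_class_numbers(
--     callee_signature: str, callable_line: int, issue_line: int
-- ) -> str:
--     first_semicolon = callee_signature.find(";")
--     if first_semicolon < 0:
--         return callee_signature
--     class_name = callee_signature[:first_semicolon]
--     segments = class_name.split("$")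
--     stripped_classname = "$".join(
--         segments[:1] + [segment.lstrip("0123456789") for segment in segments[1:]]
--     )
--     if stripped_classname == class_name:
--         return callee_signature
--     relative_line = -1
--     if issue_line > -1 and issue_line >= callable_line:
--         relative_line = issue_line - callable_line
--     return f"{stripped_classname}#{relative_line}{callee_signature[first_semicolon:]}"
-- ===== Notes on version B (the rewrite author's own statement) =====
-- stated objective: simpler
-- what changed: Replaces the index-based while loop with a manual inner digit-skipping loop by splitting the class name on '$', stripping leading digits from each non-first segment with lstrip('0123456789'), and rejoining with '$'.
import Mathlib
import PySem

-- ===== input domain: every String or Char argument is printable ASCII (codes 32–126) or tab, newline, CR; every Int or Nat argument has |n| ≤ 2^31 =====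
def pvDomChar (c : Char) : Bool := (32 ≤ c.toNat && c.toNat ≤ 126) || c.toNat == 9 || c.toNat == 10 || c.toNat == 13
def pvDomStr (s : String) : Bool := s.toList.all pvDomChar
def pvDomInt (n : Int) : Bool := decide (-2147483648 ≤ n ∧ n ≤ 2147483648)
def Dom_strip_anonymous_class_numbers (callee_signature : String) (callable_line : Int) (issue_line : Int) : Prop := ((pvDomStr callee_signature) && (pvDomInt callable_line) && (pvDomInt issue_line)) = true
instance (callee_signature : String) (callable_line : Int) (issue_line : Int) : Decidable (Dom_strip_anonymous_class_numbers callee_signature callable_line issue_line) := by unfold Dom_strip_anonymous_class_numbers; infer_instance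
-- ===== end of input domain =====

-- B rewrites A's index-based scan (with its manual inner digit-skipping while loop) as
-- split-on-'$' / lstrip digits of each later segment / rejoin — simpler, same O(n) cost.

-- ===== PORT A =====

-- inner 'while index < class_name_length and class_name[index].isdigit(): index += 1'
def pvSkipDigits (cls : List Char) (index : Nat) : Nat :=
  if _h : index < cls.length ∧ PySem.Chars.isdigit (cls.getD index ' ') = true then
    pvSkipDigits cls (index + 1)
  else index
termination_by cls.length - index

theorem pvSkipDigits_ge (cls : List Char) (index : Nat) : index ≤ pvSkipDigits cls index := by
  fun_induction pvSkipDigits cls index with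
  | case1 _ _ ih => omega
  | case2 => omega

-- outer while loop of A: appends each character, skipping digit runs after '$'
def pvLoopA (cls : List Char) (index : Nat) (acc : List Char) : List Char :=
  if h : index < cls.length then
    -- character = class_name[index]; stripped_classname += character; index += 1
    if PySem.Chars.isdigit (cls.getD (index + 1) ' ') = true ∧ cls.getD index ' ' = '$'
        ∧ index + 1 ≠ cls.length then
      pvLoopA cls (pvSkipDigits cls (index + 1)) (acc ++ [cls.getD index ' '])
    else
      pvLoopA cls (index + 1) (acc ++ [cls.getD index ' '])
  else acc
termination_by cls.length - index
decreasing_by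
  · have := pvSkipDigits_ge cls (index + 1); omega
  · omega

def strip_anonymous_class_numbers (callee_signature : String) (callable_line : Int) (issue_line : Int) : String :=
  let cs := callee_signature.toList
  let first_semicolon := PySem.Chars.find cs [';']
  if first_semicolon < 0 then callee_signature
  else
    let class_name := PySem.List.slice cs none (some first_semicolon)
    let stripped_classname := pvLoopA class_name 0 []
    if stripped_classname = class_name then callee_signature
    else
      let relative_line : Int :=
        if issue_line > -1 ∧ issue_line ≥ callable_line then issue_line - callable_line else -1
      String.ofList (stripped_classname ++ ['#'] ++ PySem.Int.toChars relative_line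
        ++ PySem.List.slice cs (some first_semicolon) none)

-- ===== PORT B =====

def pvDigitChars : List Char := ['0', '1', '2', '3', '4', '5', '6', '7', '8', '9']

-- segment.lstrip("0123456789"): drop leading characters that are in the digit set (exact)
def pvLstripDigits (segment : List Char) : List Char :=
  segment.dropWhile (fun c => pvDigitChars.contains c)

def strip_anonymous_class_numbers_alt (callee_signature : String) (callable_line : Int) (issue_line : Int) : String :=
  let cs := callee_signature.toList
  let first_semicolon := PySem.Chars.find cs [';']
  if first_semicolon < 0 then callee_signature
  else
    let class_name := PySem.List.slice cs none (some first_semicolon)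
    let segments := PySem.Chars.splitOn class_name ['$']
    -- "$".join(segments[:1] + [segment.lstrip("0123456789") for segment in segments[1:]])
    let stripped_classname :=
      PySem.Chars.join ['$'] (segments.take 1 ++ (segments.drop 1).map pvLstripDigits)
    if stripped_classname = class_name then callee_signature
    else
      let relative_line : Int :=
        if issue_line > -1 ∧ issue_line ≥ callable_line then issue_line - callable_line else -1
      String.ofList (stripped_classname ++ ['#'] ++ PySem.Int.toChars relative_line
        ++ PySem.List.slice cs (some first_semicolon) none)

-- ===== PRECONDITION & SPEC =====
def Spec_strip_anonymous_class_numbers (callee_signature : String) (callable_line : Int) (issue_line : Int) (out : String) : Prop := out = strip_anonymous_class_numbers_alt callee_signature callable_line issue_line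
instance (callee_signature : String) (callable_line : Int) (issue_line : Int) (out : String) : Decidable (Spec_strip_anonymous_class_numbers callee_signature callable_line issue_line out) := by unfold Spec_strip_anonymous_class_numbers; infer_instance

-- ===== CLAIM (what is proved, stated in full; the proofs are below) =====
def Claim_equal_strip_anonymous_class_numbers : Prop := ∀ (callee_signature : String) (callable_line : Int) (issue_line : Int), Dom_strip_anonymous_class_numbers callee_signature callable_line issue_line → Spec_strip_anonymous_class_numbers callee_signature callable_line issue_line (strip_anonymous_class_numbers callee_signature callable_line issue_line)

-- ===== LEMMAS AND PROOFS =====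

theorem pvDigitChars_contains_eq (c : Char) :
    pvDigitChars.contains c = PySem.Chars.isdigit c := by
  have h0 : ('0':Char).val.toNat = 48 := rfl
  have h9 : ('9':Char).val.toNat = 57 := rfl
  rw [Bool.eq_iff_iff]
  simp only [pvDigitChars, PySem.Chars.isdigit, List.contains_eq_mem, List.mem_cons,
    List.not_mem_nil, or_false, Char.le_def, UInt32.le_iff_toNat_le, Char.ext_iff,
    ← UInt32.toNat_inj, h0, h9, decide_eq_true_eq, Bool.and_eq_true,
    show ('1':Char).val.toNat = 49 from rfl, show ('2':Char).val.toNat = 50 from rfl,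
    show ('3':Char).val.toNat = 51 from rfl, show ('4':Char).val.toNat = 52 from rfl,
    show ('5':Char).val.toNat = 53 from rfl, show ('6':Char).val.toNat = 54 from rfl,
    show ('7':Char).val.toNat = 55 from rfl, show ('8':Char).val.toNat = 56 from rfl]
  omega

theorem pvLstripDigits_eq (s : List Char) :
    pvLstripDigits s = s.dropWhile PySem.Chars.isdigit := by
  unfold pvLstripDigits
  congr 1
  funext c
  exact pvDigitChars_contains_eq c

def pvG : List Char → List Char
  | [] => []
  | c :: rest =>
    if c = '$' then c :: pvG (rest.dropWhile PySem.Chars.isdigit)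
    else c :: pvG rest
termination_by l => l.length
decreasing_by
  · have := List.length_dropWhile_le (p := PySem.Chars.isdigit) rest; simpa using Nat.lt_succ_of_le this
  · simp

theorem pvSkipDigits_eq (cls : List Char) (index : Nat) :
    pvSkipDigits cls index = index + ((cls.drop index).takeWhile PySem.Chars.isdigit).length := by
  fun_induction pvSkipDigits cls index with
  | case1 index h ih =>
    obtain ⟨hlt, hdig⟩ := h
    rw [ih]
    rw [List.drop_eq_getElem_cons hlt]
    rw [List.takeWhile_cons]
    have : cls[index] = cls.getD index ' ' := by simp [List.getD, List.getElem?_eq_getElem hlt]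
    rw [this, hdig]
    simp
    omega
  | case2 index h =>
    rcases Nat.lt_or_ge index cls.length with hlt | hge
    · rw [List.drop_eq_getElem_cons hlt, List.takeWhile_cons]
      have : cls[index] = cls.getD index ' ' := by simp [List.getD, List.getElem?_eq_getElem hlt]
      rw [this]
      have : PySem.Chars.isdigit (cls.getD index ' ') = false := by
        rcases h2 : PySem.Chars.isdigit (cls.getD index ' ') with _|_
        · rfl
        · exact absurd ⟨hlt, h2⟩ h
      rw [this]; simp
    · rw [List.drop_eq_nil_of_le hge]; simp

theorem pvDropLenTakeWhile {α : Type} (p : α → Bool) (L : List α) :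
    L.drop (L.takeWhile p).length = L.dropWhile p := by
  induction L with
  | nil => simp
  | cons a l ih => by_cases h : p a <;> simp [List.takeWhile_cons, List.dropWhile_cons, h, ih]

theorem pvLoopA_eq (cls : List Char) (index : Nat) (acc : List Char) (hle : index ≤ cls.length) :
    pvLoopA cls index acc = acc ++ pvG (cls.drop index) := by
  fun_induction pvLoopA cls index acc with
  | case1 index acc hlt hcond ih =>
    obtain ⟨hdig, hdollar, hne⟩ := hcond
    have htw := (List.takeWhile_sublist (l := cls.drop (index+1)) PySem.Chars.isdigit).length_le
    simp only [List.length_drop] at htw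
    rw [ih (by rw [pvSkipDigits_eq]; omega)]
    have hget : cls[index]'hlt = cls.getD index ' ' := by
      simp [List.getD, List.getElem?_eq_getElem hlt]
    rw [List.drop_eq_getElem_cons hlt, pvG, hget, if_pos hdollar]
    rw [pvSkipDigits_eq]
    have : cls.drop (index + 1 + ((cls.drop (index+1)).takeWhile PySem.Chars.isdigit).length)
        = (cls.drop (index+1)).dropWhile PySem.Chars.isdigit := by
      rw [← List.drop_drop, pvDropLenTakeWhile]
    rw [this]
    simp
  | case2 index acc hlt hcond ih =>
    rw [ih (by omega)]
    have hget : cls[index]'hlt = cls.getD index ' ' := by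
      simp [List.getD, List.getElem?_eq_getElem hlt]
    rw [List.drop_eq_getElem_cons hlt, pvG, hget]
    by_cases hd : cls.getD index ' ' = '$'
    · rw [if_pos hd]
      -- hcond fails: either next not digit or index+1 = length
      have : (cls.drop (index+1)).dropWhile PySem.Chars.isdigit = cls.drop (index + 1) := by
        rcases Nat.lt_or_ge (index+1) cls.length with h2 | h2
        · have hnd : PySem.Chars.isdigit (cls.getD (index+1) ' ') = false := by
            rcases h3 : PySem.Chars.isdigit (cls.getD (index+1) ' ') with _|_
            · rfl
            · exact absurd ⟨h3, hd, by omega⟩ hcond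
          rw [List.drop_eq_getElem_cons h2, List.dropWhile_cons]
          have : cls[index+1]'h2 = cls.getD (index+1) ' ' := by
            simp [List.getD, List.getElem?_eq_getElem h2]
          rw [this, hnd]
          simp
        · simp [List.drop_eq_nil_of_le h2]
      rw [this]
      simp
    · rw [if_neg hd]
      simp
  | case3 index acc h =>
    rw [List.drop_eq_nil_of_le (by omega)]
    simp [pvG]

def pvSplit : List Char → List (List Char)
  | [] => [[]]
  | c :: r =>
    if c = '$' then [] :: pvSplit r
    else
      match pvSplit r with
      | [] => [[c]]
      | h :: t => (c :: h) :: t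

theorem pvSplit_ne_nil (cs : List Char) : pvSplit cs ≠ [] := by
  cases cs with
  | nil => simp [pvSplit]
  | cons c r =>
    simp only [pvSplit]
    split
    · simp
    · split <;> simp

theorem pvSplitOn_go_eq (fuel : Nat) (l cur : List Char) (acc : List (List Char))
    (hf : l.length < fuel) :
    PySem.Chars.splitOn.go ['$'] fuel l cur acc
      = acc.reverse ++ (match pvSplit l with
          | [] => []
          | h :: t => (cur.reverse ++ h) :: t) := by
  induction fuel generalizing l cur acc with
  | zero => omega
  | succ fuel ih =>
    cases l with
    | nil => simp [PySem.Chars.splitOn.go, pvSplit]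
    | cons c rest =>
      rw [PySem.Chars.splitOn.go]
      by_cases hc : c = '$'
      · have hpre : List.isPrefixOf ['$'] (c :: rest) = true := by simp [hc, List.isPrefixOf]
        rw [if_pos hpre]
        rw [ih _ _ _ (by simp at hf ⊢; omega)]
        have := pvSplit_ne_nil rest
        cases hs : pvSplit rest with
        | nil => exact absurd hs this
        | cons h t =>
          simp [pvSplit, hc, hs]
      · have hpre : List.isPrefixOf ['$'] (c :: rest) = false := by
          simp [List.isPrefixOf]; intro h; exact absurd h.symm hc
        rw [if_neg (by simp [hpre])]
        rw [ih _ _ _ (by simp at hf ⊢; omega)]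
        have := pvSplit_ne_nil rest
        cases hs : pvSplit rest with
        | nil => exact absurd hs this
        | cons h t =>
          simp [pvSplit, hc, hs]

theorem pvSplitOn_eq (cs : List Char) : PySem.Chars.splitOn cs ['$'] = pvSplit cs := by
  rw [PySem.Chars.splitOn, pvSplitOn_go_eq _ _ _ _ (by omega)]
  have := pvSplit_ne_nil cs
  cases hs : pvSplit cs with
  | nil => exact absurd hs this
  | cons h t => simp

theorem pvJoin_cons (c : Char) (h : List Char) (ts : List (List Char)) (hc : c ≠ '$') :
    PySem.Chars.join ['$'] ((c :: h) :: ts) = c :: PySem.Chars.join ['$'] (h :: ts) := by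
  cases ts with
  | nil => rw [PySem.Chars.join_singleton, PySem.Chars.join_singleton]
  | cons q rest => rw [PySem.Chars.join_cons_cons, PySem.Chars.join_cons_cons]; simp

theorem pvHK (n : Nat) : ∀ cs : List Char, cs.length ≤ n →
    (PySem.Chars.join ['$'] ((pvSplit cs).take 1 ++ ((pvSplit cs).drop 1).map pvLstripDigits)
        = pvG cs)
    ∧ (PySem.Chars.join ['$'] ((pvSplit cs).map pvLstripDigits)
        = pvG (cs.dropWhile PySem.Chars.isdigit)) := by
  induction n with
  | zero =>
    intro cs hlen
    have : cs = [] := List.eq_nil_of_length_eq_zero (by omega)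
    subst this
    constructor
    · simp [pvSplit, pvG, PySem.Chars.join_singleton]
    · simp [pvSplit, pvG, pvLstripDigits, PySem.Chars.join_singleton]
  | succ n ih =>
    intro cs hlen
    have hH : PySem.Chars.join ['$'] ((pvSplit cs).take 1 ++ ((pvSplit cs).drop 1).map pvLstripDigits)
        = pvG cs := by
      cases cs with
      | nil => simp [pvSplit, pvG, PySem.Chars.join_singleton]
      | cons c r =>
        simp only [List.length_cons] at hlen
        by_cases hc : c = '$'
        · subst hc
          rw [show pvSplit ('$' :: r) = [] :: pvSplit r by simp [pvSplit]]
          obtain ⟨h, t, hs⟩ : ∃ h t, pvSplit r = h :: t := by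
            cases hs : pvSplit r with
            | nil => exact absurd hs (pvSplit_ne_nil r)
            | cons h t => exact ⟨h, t, rfl⟩
          rw [hs]
          simp only [List.take, List.drop, List.map_cons, List.singleton_append]
          rw [PySem.Chars.join_cons_cons]
          have hK := (ih r (by omega)).2
          rw [hs] at hK
          simp only [List.map_cons] at hK
          rw [show pvG ('$' :: r) = '$' :: pvG (r.dropWhile PySem.Chars.isdigit) by rw [pvG]; simp]
          simp [hK]
        · obtain ⟨h, t, hs⟩ : ∃ h t, pvSplit r = h :: t := by
            cases hs : pvSplit r with
            | nil => exact absurd hs (pvSplit_ne_nil r)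
            | cons h t => exact ⟨h, t, rfl⟩
          rw [show pvSplit (c :: r) = (c :: h) :: t by simp [pvSplit, hc, hs]]
          simp only [List.take, List.drop, List.singleton_append]
          rw [pvJoin_cons c h (t.map pvLstripDigits) hc]
          have hHr := (ih r (by omega)).1
          rw [hs] at hHr
          simp only [List.take, List.drop, List.singleton_append] at hHr
          rw [hHr]
          rw [pvG, if_neg hc]
    refine ⟨hH, ?_⟩
    cases cs with
    | nil => simp [pvSplit, pvG, pvLstripDigits, PySem.Chars.join_singleton]
    | cons c r =>
      simp only [List.length_cons] at hlen
      by_cases hdig : PySem.Chars.isdigit c = true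
      · have hc : c ≠ '$' := by
          intro h; subst h; simp [PySem.Chars.isdigit] at hdig
        obtain ⟨h, t, hs⟩ : ∃ h t, pvSplit r = h :: t := by
          cases hs : pvSplit r with
          | nil => exact absurd hs (pvSplit_ne_nil r)
          | cons h t => exact ⟨h, t, rfl⟩
        rw [show pvSplit (c :: r) = (c :: h) :: t by simp [pvSplit, hc, hs]]
        simp only [List.map_cons]
        rw [show pvLstripDigits (c :: h) = pvLstripDigits h by
          rw [pvLstripDigits_eq, pvLstripDigits_eq, List.dropWhile_cons, if_pos hdig]]
        have hK := (ih r (by omega)).2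
        rw [hs] at hK
        simp only [List.map_cons] at hK
        rw [hK]
        rw [List.dropWhile_cons, if_pos hdig]
      · rw [List.dropWhile_cons, if_neg hdig]
        by_cases hc : c = '$'
        · subst hc
          rw [show pvSplit ('$' :: r) = [] :: pvSplit r by simp [pvSplit]]
          obtain ⟨h, t, hs⟩ : ∃ h t, pvSplit r = h :: t := by
            cases hs : pvSplit r with
            | nil => exact absurd hs (pvSplit_ne_nil r)
            | cons h t => exact ⟨h, t, rfl⟩
          rw [hs]
          simp only [List.map_cons]
          rw [show pvLstripDigits ([] : List Char) = [] from rfl]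
          rw [PySem.Chars.join_cons_cons]
          have hK := (ih r (by omega)).2
          rw [hs] at hK
          simp only [List.map_cons] at hK
          rw [show pvG ('$' :: r) = '$' :: pvG (r.dropWhile PySem.Chars.isdigit) by rw [pvG]; simp]
          simp [hK]
        · obtain ⟨h, t, hs⟩ : ∃ h t, pvSplit r = h :: t := by
            cases hs : pvSplit r with
            | nil => exact absurd hs (pvSplit_ne_nil r)
            | cons h t => exact ⟨h, t, rfl⟩
          rw [show pvSplit (c :: r) = (c :: h) :: t by simp [pvSplit, hc, hs]]
          simp only [List.map_cons]
          rw [show pvLstripDigits (c :: h) = c :: h by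
            rw [pvLstripDigits_eq, List.dropWhile_cons, if_neg hdig]]
          have := hH
          rw [show pvSplit (c :: r) = (c :: h) :: t by simp [pvSplit, hc, hs]] at this
          simp only [List.take, List.drop, List.singleton_append] at this
          exact this

theorem pvJoinStrip_eq (cs : List Char) :
    PySem.Chars.join ['$'] ((pvSplit cs).take 1 ++ ((pvSplit cs).drop 1).map pvLstripDigits)
      = pvG cs :=
  (pvHK cs.length cs le_rfl).1

-- the two stripped-classname computations agree on every list
theorem pvStrip_eq (cs : List Char) :
    pvLoopA cs 0 []
      = PySem.Chars.join ['$']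
          ((PySem.Chars.splitOn cs ['$']).take 1
            ++ ((PySem.Chars.splitOn cs ['$']).drop 1).map pvLstripDigits) := by
  rw [pvSplitOn_eq, pvJoinStrip_eq, pvLoopA_eq cs 0 [] (Nat.zero_le _)]
  simp

-- ===== VERDICT (by name: the statement is the Claim_ definition above) =====
theorem strip_anonymous_class_numbers_spec : Claim_equal_strip_anonymous_class_numbers := by
  intro s cl il _
  unfold Spec_strip_anonymous_class_numbers strip_anonymous_class_numbers strip_anonymous_class_numbers_alt
  simp only [pvStrip_eq]
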